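-- pv_equiv track=rewrite | github.com/Colmar-zlicheng/Multiple-Sequence-Alignment | lib/utils.py | get_query_from_path_three
-- ===== SOURCE A (Python) =====
-- def get_query_from_path_three(path, q1, q2, q0):
--     q_1 = []
--     q_2 = []
--     q_0 = []
--     i = len(q1) - 1
--     j = len(q2) - 1
--     k = len(q0) - 1
--     gap = "-"
--     for p in path:
--         if p == 0:
--             q_1.append(q1[i])
--             q_2.append(q2[j])
--             q_0.append(q0[k])
--             i = i - 1
--             j = j - 1
--             k = k - 1
--         elif p == 1:
--             q_1.append(q1[i])
--             q_2.append(gap)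
--             q_0.append(gap)
--             i = i - 1
--         elif p == 2:
--             q_1.append(gap)
--             q_2.append(q2[j])
--             q_0.append(gap)
--             j = j - 1
--         elif p == 3:
--             q_1.append(gap)
--             q_2.append(gap)
--             q_0.append(q0[k])
--             k = k - 1
--         elif p == 4:
--             q_1.append(q1[i])
--             q_2.append(q2[j])
--             q_0.append(gap)
--             i = i - 1
--             j = j - 1
--         elif p == 5:
--             q_1.append(gap)
--             q_2.append(q2[j])
--             q_0.append(q0[k])
--             k = k - 1
--             j = j - 1
--         elif p == 6:
--             q_1.append(q1[i])
--             q_2.append(gap)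
--             q_0.append(q0[k])
--             i = i - 1
--             k = k - 1
--         else:
--             assert False, "p should be in [0, 1, 2, 3, 4, 5, 6]"
--     q_1 = q_1[::-1]
--     q_2 = q_2[::-1]
--     q_0 = q_0[::-1]
--     q_1_str = "".join(q_1)
--     q_2_str = "".join(q_2)
--     q_0_str = "".join(q_0)
--     return q_1_str, q_2_str, q_0_str
-- ===== SOURCE B (Python) =====
-- def _align_one(path, s, consumes):
--     i = len(s) - 1
--     out = []
--     for p in path:
--         assert 0 <= p <= 6, "p should be in [0, 1, 2, 3, 4, 5, 6]"
--         if p in consumes: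
--             out.append(s[i])
--             i -= 1
--         else:
--             out.append("-")
--     out.reverse()
--     return "".join(out)
--
--
-- def get_query_from_path_three(path, q1, q2, q0):
--     return (_align_one(path, q1, {0, 1, 4, 6}),
--             _align_one(path, q2, {0, 2, 4, 5}),
--             _align_one(path, q0, {0, 3, 5, 6}))
-- ===== Notes on version B (the rewrite author's own statement) =====
-- stated objective: simpler
-- what changed: A builds all three aligned strings in one interleaved loop with seven explicit opcode branches; B factors the task into a single per-sequence helper (given which opcodes consume that sequence) run independently three times, one pass per sequence.
import Mathlib
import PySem

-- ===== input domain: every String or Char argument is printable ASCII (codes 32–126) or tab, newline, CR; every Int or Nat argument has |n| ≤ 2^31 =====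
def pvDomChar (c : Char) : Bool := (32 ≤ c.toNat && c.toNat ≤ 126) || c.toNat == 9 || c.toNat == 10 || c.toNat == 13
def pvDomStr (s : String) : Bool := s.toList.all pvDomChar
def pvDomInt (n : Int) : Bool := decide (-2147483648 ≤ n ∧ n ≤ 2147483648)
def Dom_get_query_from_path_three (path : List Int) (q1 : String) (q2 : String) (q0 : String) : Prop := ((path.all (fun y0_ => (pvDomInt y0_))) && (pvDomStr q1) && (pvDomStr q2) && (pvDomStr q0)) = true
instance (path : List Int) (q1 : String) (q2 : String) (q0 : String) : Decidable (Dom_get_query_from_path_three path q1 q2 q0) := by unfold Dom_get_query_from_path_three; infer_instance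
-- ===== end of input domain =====

-- B replaces A's seven-branch interleaved loop by one per-sequence pass run three times (simpler decomposition; same cost).
-- Pre_ excludes exactly the inputs where A raises (AssertionError on an opcode outside 0..6, IndexError on index underflow).


-- ===== PORT A =====
-- q1[i] with Python's negative-index rule; out of range = IndexError in Python, excluded by Pre_,
-- here a placeholder character so the port stays total.
def pvCharAt (s : List Char) (i : Int) : Char := (PySem.Chars.pyGet? s i).getD '!'

/-- A's loop: three append-order accumulators, indices i j k. The final `else` is Python's
    `assert False` (AssertionError, excluded by Pre_); the port stops with the current accumulators. -/
def pvALoop : List Int → List Char → List Char → List Char → Int → Int → Int →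
    List Char → List Char → List Char → List Char × List Char × List Char
  | [], _, _, _, _, _, _, a1, a2, a0 => (a1, a2, a0)
  | p :: ps, s1, s2, s0, i, j, k, a1, a2, a0 =>
    if p = 0 then
      pvALoop ps s1 s2 s0 (i - 1) (j - 1) (k - 1) (a1 ++ [pvCharAt s1 i]) (a2 ++ [pvCharAt s2 j]) (a0 ++ [pvCharAt s0 k])
    else if p = 1 then
      pvALoop ps s1 s2 s0 (i - 1) j k (a1 ++ [pvCharAt s1 i]) (a2 ++ ['-']) (a0 ++ ['-'])
    else if p = 2 then
      pvALoop ps s1 s2 s0 i (j - 1) k (a1 ++ ['-']) (a2 ++ [pvCharAt s2 j]) (a0 ++ ['-'])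
    else if p = 3 then
      pvALoop ps s1 s2 s0 i j (k - 1) (a1 ++ ['-']) (a2 ++ ['-']) (a0 ++ [pvCharAt s0 k])
    else if p = 4 then
      pvALoop ps s1 s2 s0 (i - 1) (j - 1) k (a1 ++ [pvCharAt s1 i]) (a2 ++ [pvCharAt s2 j]) (a0 ++ ['-'])
    else if p = 5 then
      pvALoop ps s1 s2 s0 i (j - 1) (k - 1) (a1 ++ ['-']) (a2 ++ [pvCharAt s2 j]) (a0 ++ [pvCharAt s0 k])
    else if p = 6 then
      pvALoop ps s1 s2 s0 (i - 1) j (k - 1) (a1 ++ [pvCharAt s1 i]) (a2 ++ ['-']) (a0 ++ [pvCharAt s0 k])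
    else (a1, a2, a0)

def get_query_from_path_three (path : List Int) (q1 : String) (q2 : String) (q0 : String) : String × String × String :=
  let s1 := q1.toList
  let s2 := q2.toList
  let s0 := q0.toList
  match pvALoop path s1 s2 s0 ((s1.length : Int) - 1) ((s2.length : Int) - 1) ((s0.length : Int) - 1) [] [] [] with
  | (a1, a2, a0) => (String.mk a1.reverse, String.mk a2.reverse, String.mk a0.reverse)  -- q[::-1]; "".join

-- ===== PORT B =====
/-- B's per-sequence loop: `cs` lists the opcodes that consume this sequence.
    The range check is B's `assert` (excluded by Pre_); the port stops with the current output. -/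
def pvBLoop : List Int → List Char → List Int → Int → List Char → List Char
  | [], _, _, _, out => out
  | p :: ps, s, cs, i, out =>
    if 0 ≤ p ∧ p ≤ 6 then
      if p ∈ cs then pvBLoop ps s cs (i - 1) (out ++ [pvCharAt s i])
      else pvBLoop ps s cs i (out ++ ['-'])
    else out

def pvAlignOne (path : List Int) (s : List Char) (cs : List Int) : String :=
  String.mk (pvBLoop path s cs ((s.length : Int) - 1) []).reverse  -- out.reverse(); "".join

def get_query_from_path_three_alt (path : List Int) (q1 : String) (q2 : String) (q0 : String) : String × String × String :=
  (pvAlignOne path q1.toList [0, 1, 4, 6],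
   pvAlignOne path q2.toList [0, 2, 4, 5],
   pvAlignOne path q0.toList [0, 3, 5, 6])

-- ===== PRECONDITION & SPEC =====
-- Pre_: exactly the inputs where Python A returns normally: every opcode in 0..6 and no index
-- underflow (each sequence is consumed at most 2*len times: indices start at len-1, wrap once
-- through the negatives, and raise IndexError below -len).
def Pre_get_query_from_path_three (path : List Int) (q1 : String) (q2 : String) (q0 : String) : Prop :=
  (∀ p ∈ path, 0 ≤ p ∧ p ≤ 6) ∧
  (path.filter (fun p => p ∈ ([0, 1, 4, 6] : List Int))).length ≤ 2 * q1.length ∧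
  (path.filter (fun p => p ∈ ([0, 2, 4, 5] : List Int))).length ≤ 2 * q2.length ∧
  (path.filter (fun p => p ∈ ([0, 3, 5, 6] : List Int))).length ≤ 2 * q0.length

instance (path : List Int) (q1 : String) (q2 : String) (q0 : String) : Decidable (Pre_get_query_from_path_three path q1 q2 q0) := by unfold Pre_get_query_from_path_three; infer_instance

def pvWitness_get_query_from_path_three : List Int × String × String × String := ([0, 1, 5, 2], "ab", "abc", "ab")

def Spec_get_query_from_path_three (path : List Int) (q1 : String) (q2 : String) (q0 : String) (out : String × String × String) : Prop := out = get_query_from_path_three_alt path q1 q2 q0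
instance (path : List Int) (q1 : String) (q2 : String) (q0 : String) (out : String × String × String) : Decidable (Spec_get_query_from_path_three path q1 q2 q0 out) := by unfold Spec_get_query_from_path_three; infer_instance

-- ===== CLAIM (what is proved, stated in full; the proofs are below) =====
def Claim_equal_get_query_from_path_three : Prop := ∀ (path : List Int) (q1 : String) (q2 : String) (q0 : String), Dom_get_query_from_path_three path q1 q2 q0 → Pre_get_query_from_path_three path q1 q2 q0 → Spec_get_query_from_path_three path q1 q2 q0 (get_query_from_path_three path q1 q2 q0)

-- ===== LEMMAS AND PROOFS =====

/-- A's interleaved loop computes, componentwise, B's three independent passes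
    (for every state — the equality even holds where both Pythons raise). -/
theorem pvALoop_eq_three (path : List Int) (s1 s2 s0 : List Char) (i j k : Int)
    (a1 a2 a0 : List Char) :
    pvALoop path s1 s2 s0 i j k a1 a2 a0 =
      (pvBLoop path s1 [0, 1, 4, 6] i a1,
       pvBLoop path s2 [0, 2, 4, 5] j a2,
       pvBLoop path s0 [0, 3, 5, 6] k a0) := by
  induction path generalizing i j k a1 a2 a0 with
  | nil => rfl
  | cons p ps ih =>
    by_cases h0 : p = 0
    · subst h0; simp [pvALoop, pvBLoop, ih]
    · by_cases h1 : p = 1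
      · subst h1; simp [pvALoop, pvBLoop, ih]
      · by_cases h2 : p = 2
        · subst h2; simp [pvALoop, pvBLoop, ih]
        · by_cases h3 : p = 3
          · subst h3; simp [pvALoop, pvBLoop, ih]
          · by_cases h4 : p = 4
            · subst h4; simp [pvALoop, pvBLoop, ih]
            · by_cases h5 : p = 5
              · subst h5; simp [pvALoop, pvBLoop, ih]
              · by_cases h6 : p = 6
                · subst h6; simp [pvALoop, pvBLoop, ih]
                · have hr : ¬ (0 ≤ p ∧ p ≤ 6) := by
                    rintro ⟨hl, hu⟩; interval_cases p <;> simp_all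
                  simp [pvALoop, pvBLoop, h0, h1, h2, h3, h4, h5, h6, hr]

-- ===== VERDICT (by name: the statement is the Claim_ definition above) =====
theorem get_query_from_path_three_spec : Claim_equal_get_query_from_path_three := by
  intro path q1 q2 q0 _ _
  unfold Spec_get_query_from_path_three get_query_from_path_three get_query_from_path_three_alt pvAlignOne
  simp [pvALoop_eq_three]
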